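-- pv_equiv track=rewrite | github.com/Guillem96/advent-of-code-2021 | aoc-2022/07/main.py | select_dirs_to_remove
-- ===== SOURCE A (Python) =====
-- from typing import List, Mapping
--
-- def select_dirs_to_remove(
--     dir_sizes: Mapping[str, int],
--     total_disk_space: int = 70000000,
--     needed_space: int = 30000000,
-- ) -> str:
--     unused = total_disk_space - dir_sizes["/"]
--     big_enough = [k for k, v in dir_sizes.items() if unused + v > needed_space]
--     return min(big_enough, key=dir_sizes.__getitem__)
-- ===== SOURCE B (Python) =====
-- def select_dirs_to_remove(
--     dir_sizes,
--     total_disk_space=70000000,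
--     needed_space=30000000,
-- ):
--     threshold = needed_space - (total_disk_space - dir_sizes["/"])
--     for name, size in sorted(dir_sizes.items(), key=lambda kv: kv[1]):
--         if size > threshold:
--             return name
--     raise ValueError("no directory is big enough")
-- ===== Notes on version B (the rewrite author's own statement) =====
-- stated objective: alternative
-- what changed: Replaces A's filter-then-min (build candidate key list, then min() re-reading each size via dict lookup) with sort-then-scan: stable-sort the items by size ascending and return the first key whose size exceeds the precomputed threshold; stability makes the earliest insertion-order entry win ties exactly as min() does.
import Mathlib
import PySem

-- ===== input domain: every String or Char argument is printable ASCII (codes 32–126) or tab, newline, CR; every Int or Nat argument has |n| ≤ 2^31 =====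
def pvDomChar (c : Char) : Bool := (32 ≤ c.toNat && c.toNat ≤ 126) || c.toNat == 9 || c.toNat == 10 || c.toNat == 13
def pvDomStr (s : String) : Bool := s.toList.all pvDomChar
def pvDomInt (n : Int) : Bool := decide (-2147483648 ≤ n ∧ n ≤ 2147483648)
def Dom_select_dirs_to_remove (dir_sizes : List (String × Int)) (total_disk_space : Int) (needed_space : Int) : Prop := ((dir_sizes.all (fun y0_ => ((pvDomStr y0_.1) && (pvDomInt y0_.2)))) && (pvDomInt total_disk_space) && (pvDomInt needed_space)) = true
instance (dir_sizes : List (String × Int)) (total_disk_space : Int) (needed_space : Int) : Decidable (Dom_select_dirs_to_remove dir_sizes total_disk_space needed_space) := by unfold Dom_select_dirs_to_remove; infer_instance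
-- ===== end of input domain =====

-- B replaces A's filter-then-min over the dict with sort-then-scan: stable-sort the items by
-- size ascending and return the first key whose size exceeds the precomputed threshold
-- (stability reproduces min()'s earliest-tie rule). Same result; alternative decomposition.

-- ===== PORT A =====
-- dir_sizes is the association list representing the Python dict (insertion order, unique keys).
def select_dirs_to_remove (dir_sizes : List (String × Int)) (total_disk_space : Int) (needed_space : Int) : String :=
  let d := PySem.Dict.mk dir_sizes
  match d.get? "/" with
  | none => ""  -- KeyError: "/" missing; excluded by Pre_
  | some root =>
    let unused := total_disk_space - root
    let big_enough := (d.items.filter (fun p => decide (needed_space < unused + p.2))).map (fun p => p.1)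
    match PySem.List.min? big_enough (fun k => d.getD k 0) with
    | none => ""  -- ValueError: min() of empty sequence; excluded by Pre_
    | some m => m

-- ===== PORT B =====
def select_dirs_to_remove_alt (dir_sizes : List (String × Int)) (total_disk_space : Int) (needed_space : Int) : String :=
  match dir_sizes.find? (fun p => p.1 == "/") with
  | none => ""  -- KeyError: excluded by Pre_
  | some pr =>
    let threshold := needed_space - (total_disk_space - pr.2)
    match (PySem.List.sorted dir_sizes (fun p => p.2)).find? (fun p => decide (threshold < p.2)) with
    | none => ""  -- ValueError raised by B: excluded by Pre_
    | some b => b.1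

-- ===== PRECONDITION & SPEC =====
-- Nodup keys is the representation invariant of a Python dict as an association list (a list with
-- duplicate keys represents no dict input); the two existentials are exactly where A raises:
-- "/" must be a key (else KeyError) and some directory must qualify (else min() raises ValueError).
def Pre_select_dirs_to_remove (dir_sizes : List (String × Int)) (total_disk_space : Int) (needed_space : Int) : Prop :=
  (dir_sizes.map Prod.fst).Nodup ∧
  ∃ p ∈ dir_sizes, p.1 = "/" ∧ ∃ q ∈ dir_sizes, needed_space < total_disk_space - p.2 + q.2
instance (dir_sizes : List (String × Int)) (total_disk_space : Int) (needed_space : Int) : Decidable (Pre_select_dirs_to_remove dir_sizes total_disk_space needed_space) := by unfold Pre_select_dirs_to_remove; infer_instance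

def pvWitness_select_dirs_to_remove : (List (String × Int)) × Int × Int := ([("/", 50), ("a", 40)], 100, 60)

def Spec_select_dirs_to_remove (dir_sizes : List (String × Int)) (total_disk_space : Int) (needed_space : Int) (out : String) : Prop := out = select_dirs_to_remove_alt dir_sizes total_disk_space needed_space
instance (dir_sizes : List (String × Int)) (total_disk_space : Int) (needed_space : Int) (out : String) : Decidable (Spec_select_dirs_to_remove dir_sizes total_disk_space needed_space out) := by unfold Spec_select_dirs_to_remove; infer_instance

-- ===== CLAIM (what is proved, stated in full; the proofs are below) =====
def Claim_equal_select_dirs_to_remove : Prop := ∀ (dir_sizes : List (String × Int)) (total_disk_space : Int) (needed_space : Int), Dom_select_dirs_to_remove dir_sizes total_disk_space needed_space → Pre_select_dirs_to_remove dir_sizes total_disk_space needed_space → Spec_select_dirs_to_remove dir_sizes total_disk_space needed_space (select_dirs_to_remove dir_sizes total_disk_space needed_space)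

-- ===== LEMMAS AND PROOFS =====

-- The "first minimal qualifying pair" fold (what min(filter, key) computes over the pairs).
def pvMinP (L : List (String × Int)) : Option (String × Int) :=
  L.foldl (fun acc p => match acc with
    | none => some p
    | some b => if p.2 < b.2 then some p else some b) none

-- A's min-by-looked-up-size fold over the candidate KEYS tracks pvMinP over the candidate PAIRS,
-- provided the lookup of each candidate key gives back its pair's size.
theorem fold_min_key_eq (d : PySem.Dict String Int) (L : List (String × Int))
    (hL : ∀ p ∈ L, d.getD p.1 0 = p.2) :
    ∀ (accB : Option (String × Int)), (∀ b, accB = some b → d.getD b.1 0 = b.2) →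
    L.foldl (fun acc p => match acc with
        | none => some p.1
        | some m => if d.getD p.1 0 < d.getD m 0 then some p.1 else some m)
      (Option.map Prod.fst accB)
    = Option.map Prod.fst (L.foldl (fun acc p => match acc with
        | none => some p
        | some b => if p.2 < b.2 then some p else some b) accB) := by
  induction L with
  | nil => intro accB _; rfl
  | cons p t ih =>
    intro accB hacc
    have hp : d.getD p.1 0 = p.2 := hL p (by simp)
    have ht : ∀ r ∈ t, d.getD r.1 0 = r.2 := fun r hr => hL r (by simp [hr])
    cases accB with
    | none =>
      simpa using ih ht (some p) (fun c hc => (Option.some.inj hc) ▸ hp)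
    | some b =>
      have hb : d.getD b.1 0 = b.2 := hacc b rfl
      by_cases h : p.2 < b.2
      · have := ih ht (some p) (fun c hc => (Option.some.inj hc) ▸ hp)
        simpa [hp, hb, h] using this
      · have := ih ht (some b) (fun c hc => (Option.some.inj hc) ▸ hb)
        simpa [hp, hb, h] using this

-- A's min(big_enough, key=dir_sizes.__getitem__) over the candidate keys, as the pair-fold.
theorem min?_fold_eq (d : PySem.Dict String Int) (L : List (String × Int))
    (hL : ∀ p ∈ L, d.getD p.1 0 = p.2) :
    PySem.List.min? (L.map (fun p => p.1)) (fun k => d.getD k 0) = Option.map Prod.fst (pvMinP L) := by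
  have h := fold_min_key_eq d L hL none (by simp)
  simp only [Option.map_none] at h
  simp only [PySem.List.min?, pvMinP, List.foldl_map]
  convert h using 2
  funext a b
  cases a <;> rfl

-- Inserting a NON-qualifying element never changes the first qualifying element (any list).
theorem find?_insertBy_neg (th : Int) (x : String × Int) (s : List (String × Int))
    (hx : ¬ th < x.2) :
    (PySem.List.insertBy (fun a b => decide (a.2 < b.2)) x s).find? (fun p => decide (th < p.2))
    = s.find? (fun p => decide (th < p.2)) := by
  induction s with
  | nil => simp [PySem.List.insertBy, hx]
  | cons y ys ih =>
    by_cases hb : x.2 < y.2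
    · simp [PySem.List.insertBy, hb, hx]
    · by_cases hy : th < y.2
      · simp [PySem.List.insertBy, hb, List.find?, hy]
      · simpa [PySem.List.insertBy, hb, List.find?, hy] using ih

-- Inserting a QUALIFYING element into a size-sorted list: the new first qualifying element is
-- the old one unless x is strictly smaller (stability: equal sizes keep the old, earlier, one).
theorem find?_insertBy_pos (th : Int) (x : String × Int) (s : List (String × Int))
    (hs : s.Pairwise (fun a b => a.2 ≤ b.2)) (hx : th < x.2) :
    (PySem.List.insertBy (fun a b => decide (a.2 < b.2)) x s).find? (fun p => decide (th < p.2))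
    = match s.find? (fun p => decide (th < p.2)) with
      | none => some x
      | some b => if x.2 < b.2 then some x else some b := by
  induction s with
  | nil => simp [PySem.List.insertBy, hx]
  | cons y ys ih =>
    have hhead : ∀ b ∈ y :: ys, y.2 ≤ b.2 := by
      intro b hb
      rcases List.mem_cons.mp hb with h | h
      · exact h ▸ le_refl _
      · exact (List.pairwise_cons.mp hs).1 b h
    by_cases hb : x.2 < y.2
    · -- x goes first
      cases hf : (y :: ys).find? (fun p => decide (th < p.2)) with
      | none => simp [PySem.List.insertBy, hb, hx]
      | some b =>
        have hbmem : b ∈ y :: ys := List.mem_of_find?_eq_some hf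
        have : x.2 < b.2 := lt_of_lt_of_le hb (hhead b hbmem)
        simp [PySem.List.insertBy, hb, hx, this]
    · -- y stays first
      by_cases hy : th < y.2
      · have : ¬ x.2 < y.2 := hb
        simp [PySem.List.insertBy, hb, List.find?, hy]
      · have ih' := ih (List.pairwise_cons.mp hs).2
        simpa [PySem.List.insertBy, hb, List.find?, hy] using ih'

-- Appending one element on the right extends the insertion sort by one insertBy step.
theorem sorted_append_singleton (L : List (String × Int)) (x : String × Int) :
    PySem.List.sorted (L ++ [x]) (fun p => p.2)
    = PySem.List.insertBy (fun a b => decide (a.2 < b.2)) x (PySem.List.sorted L (fun p => p.2)) := by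
  simp [PySem.List.sorted_eq_foldl_insertBy]

-- MAIN: the first qualifying element of the stable size-sort IS the first minimal qualifying pair.
theorem find?_sorted_eq_minP (th : Int) (L : List (String × Int)) :
    (PySem.List.sorted L (fun p => p.2)).find? (fun p => decide (th < p.2))
    = pvMinP (L.filter (fun p => decide (th < p.2))) := by
  induction L using List.reverseRecOn with
  | nil => rfl
  | append_singleton L x ih =>
    rw [sorted_append_singleton, List.filter_append]
    by_cases hx : th < x.2
    · rw [find?_insertBy_pos th x _ (PySem.List.sorted_pairwise L (fun p => p.2)) hx, ih]
      simp [pvMinP, hx]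
    · rw [find?_insertBy_neg th x _ hx, ih]
      simp [pvMinP, hx]

-- ===== VERDICT (by name: the statement is the Claim_ definition above) =====
theorem select_dirs_to_remove_spec : Claim_equal_select_dirs_to_remove := by
  intro ds t n _ hpre
  obtain ⟨hnd, p, hpmem, hp1, q, hqmem, hlt⟩ := hpre
  unfold Spec_select_dirs_to_remove select_dirs_to_remove select_dirs_to_remove_alt
  have hroot : (PySem.Dict.mk ds).get? "/" = Option.map (fun x => x.2) (ds.find? (fun p => p.1 == "/")) := rfl
  cases hfind : ds.find? (fun p => p.1 == "/") with
  | none => simp [hroot, hfind]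
  | some pr =>
    simp only [hroot, hfind, Option.map_some]
    -- A's filter test is B's threshold test
    have hfilter : ds.filter (fun r => decide (n < t - pr.2 + r.2))
        = ds.filter (fun r => decide (n - (t - pr.2) < r.2)) := by
      apply List.filter_congr
      intro r _
      simp only [decide_eq_decide]
      omega
    have hkeysnd : (PySem.Dict.mk ds).keys.Nodup := hnd
    have hL : ∀ r ∈ ds.filter (fun r => decide (n < t - pr.2 + r.2)),
        (PySem.Dict.mk ds).getD r.1 0 = r.2 := by
      intro r hr
      exact PySem.Dict.getD_of_mem_items _ (by simpa using List.mem_of_mem_filter hr) hkeysnd 0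
    rw [min?_fold_eq (PySem.Dict.mk ds) _ hL, find?_sorted_eq_minP, ← hfilter]
    cases hres : pvMinP (ds.filter (fun r => decide (n < t - pr.2 + r.2))) with
    | none => rfl
    | some b => rfl
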